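-- pv_equiv track=rewrite | github.com/breckinridge22/id_3 | id_three.py | find_frequency
-- ===== SOURCE A (Python) =====
-- def find_frequency(labels):
--     freq = {}
--     for entry in labels:
--         if entry in freq:
--             freq[entry] += 1
--         else:
--             freq[entry] = 1
--     return freq
-- ===== SOURCE B (Python) =====
-- def find_frequency(labels):
--     # Idiomatic "count per unique value": distinct labels in first-occurrence
--     # order, then one .count scan per distinct label.
--     return {x: labels.count(x) for x in dict.fromkeys(labels)}
-- ===== Notes on version B (the rewrite author's own statement) =====
-- stated objective: idiomatic
-- what changed: Replaces the single accumulating dict-update loop by a comprehension over the distinct labels (dict.fromkeys) with one labels.count scan per unique label.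
import Mathlib
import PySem

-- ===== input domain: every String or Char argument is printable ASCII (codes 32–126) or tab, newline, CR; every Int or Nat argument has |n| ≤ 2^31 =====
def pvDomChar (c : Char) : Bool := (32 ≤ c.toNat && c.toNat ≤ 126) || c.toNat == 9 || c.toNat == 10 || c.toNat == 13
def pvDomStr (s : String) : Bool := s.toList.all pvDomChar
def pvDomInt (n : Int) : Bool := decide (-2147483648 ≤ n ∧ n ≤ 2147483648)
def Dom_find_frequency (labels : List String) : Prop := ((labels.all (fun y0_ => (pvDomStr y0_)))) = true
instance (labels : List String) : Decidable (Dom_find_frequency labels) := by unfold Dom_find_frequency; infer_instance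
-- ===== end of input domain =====

-- B counts each distinct label with its own scan instead of A's accumulating dict loop (idiomatic, not faster).

-- ===== PORT A =====
def find_frequency (labels : List String) : List (String × Int) :=
  (labels.foldl (fun freq entry =>
      if freq.contains entry then freq.insert entry (freq.getD entry 0 + 1)
      else freq.insert entry 1)
    (PySem.Dict.empty : PySem.Dict String Int)).items

-- ===== PORT B =====
def find_frequency_alt (labels : List String) : List (String × Int) :=
  (PySem.List.dedup labels).map (fun x => (x, (labels.count x : Int)))

-- ===== PRECONDITION & SPEC =====
def Spec_find_frequency (labels : List String) (out : List (String × Int)) : Prop := out = find_frequency_alt labels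
instance (labels : List String) (out : List (String × Int)) : Decidable (Spec_find_frequency labels out) := by unfold Spec_find_frequency; infer_instance

-- ===== CLAIM (what is proved, stated in full; the proofs are below) =====
def Claim_equal_find_frequency : Prop := ∀ (labels : List String), Dom_find_frequency labels → Spec_find_frequency labels (find_frequency labels)

-- ===== LEMMAS AND PROOFS =====

-- A's two branches are both "insert entry (getD entry 0 + 1)": in the absent branch getD is 0.
theorem find_frequency_step_eq (freq : PySem.Dict String Int) (entry : String) :
    (if freq.contains entry then freq.insert entry (freq.getD entry 0 + 1)
     else freq.insert entry 1) = freq.insert entry (freq.getD entry 0 + 1) := by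
  by_cases h : freq.contains entry = true
  · simp [h]
  · simp [h, PySem.Dict.getD_of_not_contains freq (0:Int) (by simpa using h)]

-- ===== VERDICT (by name: the statement is the Claim_ definition above) =====
theorem find_frequency_spec : Claim_equal_find_frequency := by
  intro labels _
  unfold Spec_find_frequency find_frequency find_frequency_alt
  rw [PySem.List.foldl_congr_mem labels _
        (fun freq entry => freq.insert entry (freq.getD entry 0 + 1)) PySem.Dict.empty
        (fun acc x _ => find_frequency_step_eq acc x),
      PySem.Dict.foldl_insert_getD_add_one_eq_counter, PySem.Dict.items_counter]
  simp
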